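-- pv_equiv track=rewrite | github.com/pypi-data/pypi-mirror-216 | packages/bring-order/bring_order-0.3.1.tar.gz/bring_order-0.3.1/bring_order/inductive.py | get_first_words
-- ===== SOURCE A (Python) =====
-- def get_first_words(word_list):
--     """Takes a word list and returns a string that has the first sentence or
--     the first five words and three dots if the sentence is longer.
--
--     Args:
--         word_list (list)
--
--     Returns:
--         first_words (str)
--     """
--     first_words = f'{word_list[0]}'
--
--     for word in word_list[1:5]:
--         first_words += f' {word}'
--         if any(mark in word for mark in ['.', '?', '!']):
--             return first_words.strip('.')
--
--     first_words.strip('.').strip(',')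
--     if len(word_list) > 5:
--         first_words += '...'
--
--     return first_words
-- ===== SOURCE B (Python) =====
-- def get_first_words(word_list):
--     """Return the first sentence, or the first five words plus '...'.
--
--     Finds the sentence-ending index first, then assembles the string once,
--     instead of accumulating word by word inside the scan.
--     """
--     stop = next((i for i in range(1, min(5, len(word_list)))
--                  if any(m in word_list[i] for m in ('.', '?', '!'))), None)
--     if stop is not None:
--         return ' '.join(f'{w}' for w in word_list[:stop + 1]).strip('.')
--     result = ' '.join(f'{w}' for w in word_list[:5])
--     if len(word_list) > 5:
--         result += '...'
--     return result
-- ===== Notes on version B (the rewrite author's own statement) =====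
-- stated objective: alternative
-- what changed: B first locates the index of the sentence-ending word with a next()-over-range scan, then assembles the result in one join over the corresponding list slice, instead of A's word-by-word string accumulation with a mid-loop early return.
import Mathlib
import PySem

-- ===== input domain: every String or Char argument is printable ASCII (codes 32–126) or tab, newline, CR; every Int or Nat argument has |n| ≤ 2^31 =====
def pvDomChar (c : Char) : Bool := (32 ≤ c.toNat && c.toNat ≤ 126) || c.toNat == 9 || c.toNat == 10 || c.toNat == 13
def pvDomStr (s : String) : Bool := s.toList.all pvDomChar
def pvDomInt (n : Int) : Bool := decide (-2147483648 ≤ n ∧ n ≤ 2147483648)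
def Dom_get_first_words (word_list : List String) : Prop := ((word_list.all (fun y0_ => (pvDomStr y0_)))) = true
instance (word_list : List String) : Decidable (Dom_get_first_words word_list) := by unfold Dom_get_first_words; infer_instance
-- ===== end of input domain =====

-- B locates the sentence-ending word first and assembles the joined string once,
-- instead of A's word-by-word accumulation with a mid-loop return (objective: alternative decomposition).


-- ===== PORT A =====
-- any(mark in word for mark in ['.', '?', '!'])
def pvA_marks (word : String) : Bool :=
  ([".", "?", "!"].any fun mark => PySem.Str.isIn mark word)

-- A's for-loop over word_list[1:5]: accumulator first_words, f' {word}' appended,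
-- mid-loop early return (stripped of '.'); the [] case is the code after the loop.
def pvA_loop (word_list : List String) (first_words : List Char) : List String → List Char
  | [] => if word_list.length > 5 then first_words ++ "...".toList else first_words
  | word :: rest =>
    let first_words := first_words ++ (' ' :: word.toList)
    if pvA_marks word then PySem.Chars.stripChars first_words ['.']
    else pvA_loop word_list first_words rest

def get_first_words (word_list : List String) : String :=
  -- word_list[0] raises IndexError on []; Pre_ excludes that input
  String.ofList (pvA_loop word_list (PySem.List.pyGetD word_list 0 "").toList
               (PySem.List.slice word_list (some 1) (some 5)))

-- ===== PORT B =====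
-- stop = next((i for i in range(1, min(5, len(word_list)))
--              if any(m in word_list[i] for m in ('.', '?', '!'))), None)
def get_first_words_alt (word_list : List String) : String :=
  let stop := (PySem.List.pyRange 1 (min 5 (word_list.length : Int)) 1).find?
                (fun i => [".", "?", "!"].any fun m =>
                            PySem.Str.isIn m (PySem.List.pyGetD word_list i ""))
  match stop with
  | some i =>
    -- ' '.join(f'{w}' for w in word_list[:stop + 1]).strip('.')
    String.ofList (PySem.Chars.stripChars
      (PySem.Chars.join " ".toList
        ((PySem.List.slice word_list none (some (i + 1))).map String.toList)) ['.'])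
  | none =>
    -- result = ' '.join(f'{w}' for w in word_list[:5]); '...' appended iff len > 5
    let result := PySem.Chars.join " ".toList
        ((PySem.List.slice word_list none (some 5)).map String.toList)
    if word_list.length > 5 then String.ofList (result ++ "...".toList) else String.ofList result

-- ===== PRECONDITION & SPEC =====
-- Pre_ excludes only the empty list, on which A raises IndexError at word_list[0].
def Pre_get_first_words (word_list : List String) : Prop := word_list ≠ []
instance (word_list : List String) : Decidable (Pre_get_first_words word_list) := by
  unfold Pre_get_first_words; infer_instance
def pvWitness_get_first_words : List String := ["hello", "world."]

def Spec_get_first_words (word_list : List String) (out : String) : Prop := out = get_first_words_alt word_list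
instance (word_list : List String) (out : String) : Decidable (Spec_get_first_words word_list out) := by unfold Spec_get_first_words; infer_instance

-- ===== CLAIM (what is proved, stated in full; the proofs are below) =====
def Claim_equal_get_first_words : Prop := ∀ (word_list : List String), Dom_get_first_words word_list → Pre_get_first_words word_list → Spec_get_first_words word_list (get_first_words word_list)

-- ===== LEMMAS AND PROOFS =====

-- A = B on every non-empty list: case analysis on the first five words; in each shape
-- find? over range(1, min(5, len)) is evaluated against A's unrolled loop, splitting on
-- whether each scanned word carries a sentence-ending mark.
theorem pv_main : ∀ wl : List String, wl ≠ [] → get_first_words wl = get_first_words_alt wl := by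
  have hr1 : PySem.List.pyRange 1 1 1 = [] := by decide
  have hr2 : PySem.List.pyRange 1 2 1 = [1] := by decide
  have hr3 : PySem.List.pyRange 1 3 1 = [1, 2] := by decide
  have hr4 : PySem.List.pyRange 1 4 1 = [1, 2, 3] := by decide
  have hr5 : PySem.List.pyRange 1 5 1 = [1, 2, 3, 4] := by decide
  intro wl hpre
  unfold get_first_words get_first_words_alt
  match wl with
  | [] => exact absurd rfl hpre
  | [a] =>
    simp [pvA_loop, pvA_marks, hr1, List.find?, PySem.List.pyGetD_ofNat',
      PySem.Chars.join_singleton, PySem.Chars.join_cons_cons,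
      PySem.List.slice_to, PySem.List.slice_toNat, -Bool.or_eq_true]
  | [a, b] =>
    simp [pvA_loop, pvA_marks, List.find?, PySem.List.pyGetD_ofNat',
      PySem.Chars.join_singleton, PySem.Chars.join_cons_cons,
      PySem.List.slice_to, PySem.List.slice_toNat, -Bool.or_eq_true]
    cases hb : (PySem.Chars.isIn ['.'] b.toList || (PySem.Chars.isIn ['?'] b.toList || PySem.Chars.isIn ['!'] b.toList)) <;>
      simp [hb, hr2, List.find?, PySem.List.pyGetD_ofNat', PySem.Chars.join_singleton,
        PySem.Chars.join_cons_cons, PySem.List.slice_to, PySem.List.slice_toNat, -Bool.or_eq_true]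
  | [a, b, c] =>
    simp [pvA_loop, pvA_marks, List.find?, PySem.List.pyGetD_ofNat',
      PySem.Chars.join_singleton, PySem.Chars.join_cons_cons,
      PySem.List.slice_to, PySem.List.slice_toNat, -Bool.or_eq_true]
    cases hb : (PySem.Chars.isIn ['.'] b.toList || (PySem.Chars.isIn ['?'] b.toList || PySem.Chars.isIn ['!'] b.toList)) <;>
    cases hc : (PySem.Chars.isIn ['.'] c.toList || (PySem.Chars.isIn ['?'] c.toList || PySem.Chars.isIn ['!'] c.toList)) <;>
      simp [hb, hc, hr3, List.find?, PySem.List.pyGetD_ofNat', PySem.Chars.join_singleton,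
        PySem.Chars.join_cons_cons, PySem.List.slice_to, PySem.List.slice_toNat, -Bool.or_eq_true]
  | [a, b, c, d] =>
    simp [pvA_loop, pvA_marks, List.find?, PySem.List.pyGetD_ofNat',
      PySem.Chars.join_singleton, PySem.Chars.join_cons_cons,
      PySem.List.slice_to, PySem.List.slice_toNat, -Bool.or_eq_true]
    cases hb : (PySem.Chars.isIn ['.'] b.toList || (PySem.Chars.isIn ['?'] b.toList || PySem.Chars.isIn ['!'] b.toList)) <;>
    cases hc : (PySem.Chars.isIn ['.'] c.toList || (PySem.Chars.isIn ['?'] c.toList || PySem.Chars.isIn ['!'] c.toList)) <;>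
    cases hd : (PySem.Chars.isIn ['.'] d.toList || (PySem.Chars.isIn ['?'] d.toList || PySem.Chars.isIn ['!'] d.toList)) <;>
      simp [hb, hc, hd, hr4, List.find?, PySem.List.pyGetD_ofNat', PySem.Chars.join_singleton,
        PySem.Chars.join_cons_cons, PySem.List.slice_to, PySem.List.slice_toNat, -Bool.or_eq_true]
  | a::b::c::d::e::t =>
    have hm : min 5 ((t.length : Int) + 1 + 1 + 1 + 1 + 1) = 5 := by omega
    simp [pvA_loop, pvA_marks, hm, List.find?, PySem.List.pyGetD_ofNat',
      PySem.Chars.join_singleton, PySem.Chars.join_cons_cons,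
      PySem.List.slice_to, PySem.List.slice_toNat, -Bool.or_eq_true]
    cases hb : (PySem.Chars.isIn ['.'] b.toList || (PySem.Chars.isIn ['?'] b.toList || PySem.Chars.isIn ['!'] b.toList)) <;>
    cases hc : (PySem.Chars.isIn ['.'] c.toList || (PySem.Chars.isIn ['?'] c.toList || PySem.Chars.isIn ['!'] c.toList)) <;>
    cases hd : (PySem.Chars.isIn ['.'] d.toList || (PySem.Chars.isIn ['?'] d.toList || PySem.Chars.isIn ['!'] d.toList)) <;>
    cases he : (PySem.Chars.isIn ['.'] e.toList || (PySem.Chars.isIn ['?'] e.toList || PySem.Chars.isIn ['!'] e.toList)) <;>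
      simp [hb, hc, hd, he, hm, hr5, List.find?, PySem.List.pyGetD_ofNat', PySem.Chars.join_singleton,
        PySem.Chars.join_cons_cons, PySem.List.slice_to, PySem.List.slice_toNat, apply_ite String.ofList,
        -Bool.or_eq_true]

-- ===== VERDICT (by name: the statement is the Claim_ definition above) =====
theorem get_first_words_spec : Claim_equal_get_first_words := by
  intro wl _ hpre
  unfold Spec_get_first_words
  exact pv_main wl hpre
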